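-- pv_equiv track=rewrite | github.com/pypi-data/pypi-mirror-366 | packages/kss/kss-6.0.5-py3-none-any.whl/kss/_modules/morphemes/utils.py | _preserve_space
-- ===== SOURCE A (Python) =====
-- from typing import List, Tuple
--
-- def _preserve_space(
--     text: str,
--     tokens: List[Tuple[str, str]],
--     spaces: str,
-- ) -> List[Tuple[str, str]]:
--     """
--     Restore spaces from analyzed results
--
--     Args:
--         text (str): input text
--         tokens (List[Tuple[str, str]]): analyzed results
--         spaces (str): space tokens to add
--
--     Returns:
--         List[Tuple[str, str]]: analyzed results with space
--     """
--     results = list()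
--     len_text = len(text)
--     len_tokens = len(tokens)
--     text_idx = 0
--     token_idx = 0
--
--     while text_idx < len_text:
--         character = text[text_idx]
--         if character in spaces:
--             results.append((character, "SP"))
--             text_idx += 1
--         else:
--             if token_idx < len_tokens:
--                 token = tokens[token_idx]
--                 results.append(token)
--                 text_idx += len(token[0])
--                 token_idx += 1
--             else:
--                 break
--     return results
-- ===== SOURCE B (Python) =====
-- from typing import List, Tuple
--
-- def _preserve_space(
--     text: str,
--     tokens: List[Tuple[str, str]],
--     spaces: str,
-- ) -> List[Tuple[str, str]]:
--     results = []
--     len_text = len(text)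
--     text_idx = 0
--     for token in tokens:
--         while text_idx < len_text and text[text_idx] in spaces:
--             results.append((text[text_idx], "SP"))
--             text_idx += 1
--         if text_idx < len_text:
--             results.append(token)
--             text_idx += len(token[0])
--         else:
--             break
--     else:
--         while text_idx < len_text and text[text_idx] in spaces:
--             results.append((text[text_idx], "SP"))
--             text_idx += 1
--     return results
-- ===== Notes on version B (the rewrite author's own statement) =====
-- stated objective: alternative
-- what changed: A's single flat while-loop over text positions (branching per character) is replaced by an outer loop over tokens with inner space-flushing loops and a final trailing-space flush.
import Mathlib
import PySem

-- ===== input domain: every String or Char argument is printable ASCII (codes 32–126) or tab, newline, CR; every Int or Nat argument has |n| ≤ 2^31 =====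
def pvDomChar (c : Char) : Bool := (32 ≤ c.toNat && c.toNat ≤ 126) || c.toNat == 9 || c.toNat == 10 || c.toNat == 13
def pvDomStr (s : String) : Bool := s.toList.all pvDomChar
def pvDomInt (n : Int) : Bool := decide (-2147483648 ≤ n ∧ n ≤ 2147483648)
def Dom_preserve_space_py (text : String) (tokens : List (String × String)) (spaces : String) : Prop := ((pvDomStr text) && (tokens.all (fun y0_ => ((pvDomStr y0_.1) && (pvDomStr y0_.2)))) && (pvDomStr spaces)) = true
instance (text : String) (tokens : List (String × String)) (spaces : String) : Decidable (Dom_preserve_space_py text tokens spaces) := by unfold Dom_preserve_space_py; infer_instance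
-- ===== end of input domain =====

-- B restructures A's single flat loop over text positions into an outer loop over
-- tokens with inner space-flushing loops (objective: alternative decomposition, same cost).


-- ===== PORT A =====
-- A's while loop over text positions, as recursion on the remaining text (cs) and
-- remaining tokens; 'text_idx += len(token[0])' is dropping that many chars.
-- 'character in spaces' is substring membership of a 1-char string = char membership.
def pvGoA (cs : List Char) (toks : List (String × String)) (spaces : String) :
    List (String × String) :=
  match cs with
  | [] => []
  | c :: rest =>
    if spaces.toList.contains c then
      (String.ofList [c], "SP") :: pvGoA rest toks spaces
    else
      match toks with
      | [] => []
      | t :: ts => t :: pvGoA ((c :: rest).drop t.1.toList.length) ts spaces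
termination_by cs.length + toks.length
decreasing_by
  all_goals simp; try omega

def preserve_space_py (text : String) (tokens : List (String × String)) (spaces : String) : List (String × String) :=
  pvGoA text.toList tokens spaces

-- ===== PORT B =====
-- B's inner space-flushing while loop: emits (char,"SP") pairs and returns the rest.
def pvFlush (cs : List Char) (spaces : String) : List (String × String) × List Char :=
  match cs with
  | [] => ([], [])
  | c :: rest =>
    if spaces.toList.contains c then
      let (sp, cs') := pvFlush rest spaces
      ((String.ofList [c], "SP") :: sp, cs')
    else
      ([], c :: rest)

-- B's outer for-loop over tokens; the trailing flush is the base case.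
def pvGoB (toks : List (String × String)) (cs : List Char) (spaces : String) :
    List (String × String) :=
  match toks with
  | [] => (pvFlush cs spaces).1
  | t :: ts =>
    let (sp, cs') := pvFlush cs spaces
    match cs' with
    | [] => sp
    | _ :: _ => sp ++ (t :: pvGoB ts (cs'.drop t.1.toList.length) spaces)

def preserve_space_py_alt (text : String) (tokens : List (String × String)) (spaces : String) : List (String × String) :=
  pvGoB tokens text.toList spaces

-- ===== PRECONDITION & SPEC =====
def Spec_preserve_space_py (text : String) (tokens : List (String × String)) (spaces : String) (out : List (String × String)) : Prop := out = preserve_space_py_alt text tokens spaces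
instance (text : String) (tokens : List (String × String)) (spaces : String) (out : List (String × String)) : Decidable (Spec_preserve_space_py text tokens spaces out) := by unfold Spec_preserve_space_py; infer_instance

-- ===== CLAIM (what is proved, stated in full; the proofs are below) =====
def Claim_equal_preserve_space_py : Prop := ∀ (text : String) (tokens : List (String × String)) (spaces : String), Dom_preserve_space_py text tokens spaces → Spec_preserve_space_py text tokens spaces (preserve_space_py text tokens spaces)

-- ===== LEMMAS AND PROOFS =====

-- Unfolding equations for the well-founded recursion pvGoA.
theorem pvGoA_nil (toks : List (String × String)) (spaces : String) :
    pvGoA [] toks spaces = [] := by rw [pvGoA.eq_def]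

theorem pvGoA_cons_space (c : Char) (rest : List Char) (toks : List (String × String))
    (spaces : String) (h : c ∈ spaces.toList) :
    pvGoA (c :: rest) toks spaces = (String.ofList [c], "SP") :: pvGoA rest toks spaces := by
  rw [pvGoA.eq_def]; simp [h]

theorem pvGoA_cons_nonspace_nil (c : Char) (rest : List Char) (spaces : String)
    (h : c ∉ spaces.toList) :
    pvGoA (c :: rest) [] spaces = [] := by
  rw [pvGoA.eq_def]; simp [h]

theorem pvGoA_cons_nonspace_cons (c : Char) (rest : List Char) (t : String × String)
    (ts : List (String × String)) (spaces : String) (h : c ∉ spaces.toList) :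
    pvGoA (c :: rest) (t :: ts) spaces =
      t :: pvGoA ((c :: rest).drop t.1.toList.length) ts spaces := by
  rw [pvGoA.eq_def]; simp [h]

-- pvGoB takes a leading space char off the text directly.
theorem pvGoB_cons_space (toks : List (String × String)) (c : Char) (rest : List Char)
    (spaces : String) (h : c ∈ spaces.toList) :
    pvGoB toks (c :: rest) spaces =
      (String.ofList [c], "SP") :: pvGoB toks rest spaces := by
  cases toks with
  | nil => simp [pvGoB, pvFlush, h]
  | cons t ts =>
    simp only [pvGoB, pvFlush, List.contains_eq_mem, h, decide_true, if_pos]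
    cases hf : pvFlush rest spaces with
    | mk sp cs' =>
      cases cs' <;> simp

-- pvFlush does nothing on a non-space head.
theorem pvFlush_cons_nonspace (c : Char) (rest : List Char) (spaces : String)
    (h : c ∉ spaces.toList) :
    pvFlush (c :: rest) spaces = ([], c :: rest) := by
  simp [pvFlush, h]

theorem pvGoA_eq_pvGoB (cs : List Char) (toks : List (String × String)) (spaces : String) :
    pvGoA cs toks spaces = pvGoB toks cs spaces := by
  match cs with
  | [] =>
    cases toks <;> simp [pvGoA_nil, pvGoB, pvFlush]
  | c :: rest =>
    by_cases h : c ∈ spaces.toList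
    · rw [pvGoB_cons_space _ _ _ _ h, pvGoA_cons_space _ _ _ _ h,
        pvGoA_eq_pvGoB rest toks spaces]
    · cases toks with
      | nil =>
        rw [pvGoA_cons_nonspace_nil _ _ _ h]
        simp [pvGoB, pvFlush_cons_nonspace _ _ _ h]
      | cons t ts =>
        rw [pvGoA_cons_nonspace_cons _ _ _ _ _ h,
          pvGoA_eq_pvGoB ((c :: rest).drop t.1.toList.length) ts spaces]
        simp [pvGoB, pvFlush_cons_nonspace _ _ _ h]
termination_by cs.length + toks.length
decreasing_by
  all_goals simp; try omega

-- ===== VERDICT (by name: the statement is the Claim_ definition above) =====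
theorem preserve_space_py_spec : Claim_equal_preserve_space_py := by
  intro text tokens spaces _
  show preserve_space_py text tokens spaces = preserve_space_py_alt text tokens spaces
  exact pvGoA_eq_pvGoB text.toList tokens spaces
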